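-- pv_equiv track=rewrite | github.com/yycho0108/Scene-Diffuser | show_diffusion_paths.py | find_collision_free_intervals
-- ===== SOURCE A (Python) =====
-- def find_collision_free_intervals(binary_list, goal_idx):
--
--     intervals = []
--     start_index = None
--
--     for i, value in enumerate(binary_list):
--         # If i is the goal index, stop looking for intervals
--         if i > goal_idx:
--             break
--         # Check if the current value is a 0 (collision-free)
--         if value == 0:
--             # If this is the start of a new interval, set start_index
--             if start_index is None:
--                 start_index = i
--             # If this is the element before the goal index, add the interval to
--             # the list
--             if i == goal_idx:
--                 intervals.append((start_index, i))
--         else: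
--             # If we have an ongoing interval, save it
--             if start_index is not None:
--                 intervals.append((start_index, i - 1))
--                 start_index = None
--
--     final_intervals = []
--     for idx, interval in enumerate(intervals):
--         if idx < len(intervals) - 1:
--             final_intervals.append(
--                 (interval[0], interval[1], intervals[idx + 1][0]))
--         else:
--             if interval[1] > goal_idx:
--                 final_intervals.append((interval[0], interval[1], goal_idx))
--             else:
--                 final_intervals.append((interval[0], interval[1], None))
--
--     return final_intervals
-- ===== SOURCE B (Python) =====
-- def _emit(res, start, end):
--     # Emit a finished zero-run and back-patch the previous triple's 'next start'.
--     if res: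
--         last = res[-1]
--         res[-1] = (last[0], last[1], start)
--     res.append((start, end, None))
--
-- def find_collision_free_intervals(binary_list, goal_idx):
--     # Single left-to-right pass emitting the final triples directly.
--     if goal_idx < 0:
--         return []
--     end = min(goal_idx, len(binary_list) - 1)
--     res = []
--     start = None
--     for i in range(end + 1):
--         if binary_list[i] == 0:
--             if start is None:
--                 start = i
--         else:
--             if start is not None:
--                 _emit(res, start, i - 1)
--                 start = None
--     if start is not None and end == goal_idx:
--         _emit(res, start, end)
--     return res
-- ===== Notes on version B (the rewrite author's own statement) =====
-- stated objective: simpler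
-- what changed: A collects zero-run pairs in one loop and links them into triples in a second indexed loop with lookahead; B does a single pass that emits the final triples directly, back-patching the previously emitted triple's third field when a new run is emitted, and only scans up to min(goal_idx, len-1).
import Mathlib
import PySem

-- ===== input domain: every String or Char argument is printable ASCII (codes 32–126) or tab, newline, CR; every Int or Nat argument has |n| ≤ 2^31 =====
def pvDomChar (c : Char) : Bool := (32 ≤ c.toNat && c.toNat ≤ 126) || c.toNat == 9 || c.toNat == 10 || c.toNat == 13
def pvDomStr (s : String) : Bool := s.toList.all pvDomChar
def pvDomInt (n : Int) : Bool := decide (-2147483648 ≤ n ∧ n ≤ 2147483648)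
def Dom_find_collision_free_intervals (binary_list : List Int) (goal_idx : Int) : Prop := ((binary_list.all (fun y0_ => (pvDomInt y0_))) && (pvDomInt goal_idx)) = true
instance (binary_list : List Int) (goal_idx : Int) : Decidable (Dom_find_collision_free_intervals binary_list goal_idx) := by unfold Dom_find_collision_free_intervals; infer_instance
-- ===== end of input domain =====

-- B replaces A's two passes (collect zero-run pairs, then a linking pass) by one pass
-- that emits the final triples directly, back-patching the previous triple's third
-- field when a run is emitted (objective: simpler).

-- ===== PORT A =====
-- first loop of A: scan with index i, break when i > goal_idx, collect (start, end) runs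
def pvA_loop (g : Int) : List Int → Int → List (Int × Int) → Option Int → List (Int × Int)
  | [], _, intervals, _ => intervals
  | v :: rest, i, intervals, s =>
    if i > g then intervals
    else if v = 0 then
      -- 'if start_index is None: start_index = i'
      let st := s.getD i
      if i = g then pvA_loop g rest (i + 1) (intervals ++ [(st, i)]) (some st)
      else pvA_loop g rest (i + 1) intervals (some st)
    else
      match s with
      | some st => pvA_loop g rest (i + 1) (intervals ++ [(st, i - 1)]) none
      | none => pvA_loop g rest (i + 1) intervals none

-- second loop of A: 'idx < len(intervals) - 1' ⟺ there is a next interval (lookahead)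
def pvA_pass2 (g : Int) : List (Int × Int) → List (Int × Int × Option Int)
  | [] => []
  | (a, b) :: rest =>
    match rest with
    | (c, _) :: _ => (a, b, some c) :: pvA_pass2 g rest
    | [] => if b > g then [(a, b, some g)] else [(a, b, none)]

def find_collision_free_intervals (binary_list : List Int) (goal_idx : Int) : List (Int × Int × Option Int) :=
  pvA_pass2 goal_idx (pvA_loop goal_idx binary_list 0 [] none)

-- ===== PORT B =====
-- res is kept reversed (head = python res[-1]); 'res[-1] = (..., start)' patches the head
def pvB_patch (t : Int) : List (Int × Int × Option Int) → List (Int × Int × Option Int)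
  | [] => []
  | (a, b, _) :: r => (a, b, some t) :: r

-- python helper _emit: patch previous triple's third field, then append the new run
def pvB_emit (st e : Int) (res : List (Int × Int × Option Int)) : List (Int × Int × Option Int) :=
  (st, e, none) :: pvB_patch st res

-- 'for i in range(end+1): v = binary_list[i] …' — structural walk with counter i,
-- guard i > e for range exhaustion (exact: e ≤ len-1, so the list never runs out first)
def pvB_loop (e : Int) : List Int → Int → List (Int × Int × Option Int) → Option Int → (List (Int × Int × Option Int) × Option Int)
  | [], _, res, s => (res, s)
  | v :: rest, i, res, s =>
    if i > e then (res, s)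
    else if v = 0 then
      pvB_loop e rest (i + 1) res (some (s.getD i))
    else
      match s with
      | some st => pvB_loop e rest (i + 1) (pvB_emit st (i - 1) res) none
      | none => pvB_loop e rest (i + 1) res none

-- post-loop code: 'if start is not None and end == goal_idx: _emit(...)' then 'return res'
def pvB_finish (g e : Int) : List (Int × Int × Option Int) × Option Int → List (Int × Int × Option Int)
  | (res, some st) => if e = g then (pvB_emit st e res).reverse else res.reverse
  | (res, none) => res.reverse

def find_collision_free_intervals_alt (binary_list : List Int) (goal_idx : Int) : List (Int × Int × Option Int) :=
  if goal_idx < 0 then []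
  else
    let e := min goal_idx ((binary_list.length : Int) - 1)
    pvB_finish goal_idx e (pvB_loop e binary_list 0 [] none)

-- ===== PRECONDITION & SPEC =====
def Spec_find_collision_free_intervals (binary_list : List Int) (goal_idx : Int) (out : List (Int × Int × Option Int)) : Prop := out = find_collision_free_intervals_alt binary_list goal_idx
instance (binary_list : List Int) (goal_idx : Int) (out : List (Int × Int × Option Int)) : Decidable (Spec_find_collision_free_intervals binary_list goal_idx out) := by unfold Spec_find_collision_free_intervals; infer_instance

-- ===== CLAIM (what is proved, stated in full; the proofs are below) =====
def Claim_equal_find_collision_free_intervals : Prop := ∀ (binary_list : List Int) (goal_idx : Int), Dom_find_collision_free_intervals binary_list goal_idx → Spec_find_collision_free_intervals binary_list goal_idx (find_collision_free_intervals binary_list goal_idx)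

-- ===== LEMMAS AND PROOFS =====

-- nextO o rest : the 'third field' a run gets when the rest of the runs is `rest`
def nextO (o : Option Int) : List (Int × Int) → Option Int
  | [] => o
  | (c, _) :: _ => some c

-- linkL o xs : the linking of run-pairs into triples (third = next run's start, last = o)
def linkL (o : Option Int) : List (Int × Int) → List (Int × Int × Option Int)
  | [] => []
  | (a, b) :: rest => (a, b, nextO o rest) :: linkL o rest

lemma nextO_concat (o : Option Int) (a b : Int) (t : List (Int × Int)) :
    nextO o (t ++ [(a, b)]) = nextO (some a) t := by
  cases t with
  | nil => rfl
  | cons hd t' => obtain ⟨c, d⟩ := hd; rfl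

lemma linkL_concat (a b : Int) : ∀ (xs : List (Int × Int)) (o : Option Int),
    linkL o (xs ++ [(a, b)]) = linkL (some a) xs ++ [(a, b, o)] := by
  intro xs
  induction xs with
  | nil => intro o; simp [linkL, nextO]
  | cons hd t ih =>
    intro o
    obtain ⟨c, d⟩ := hd
    simp only [List.cons_append, linkL, nextO_concat, ih]

lemma patch_link (t : Int) (o : Option Int) (xs : List (Int × Int)) :
    pvB_patch t (linkL o xs).reverse = (linkL (some t) xs).reverse := by
  rcases List.eq_nil_or_concat xs with h | ⟨ys, ⟨a, b⟩, h⟩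
  · subst h; simp [linkL, pvB_patch]
  · subst h
    rw [List.concat_eq_append, linkL_concat, linkL_concat]
    simp [pvB_patch]

lemma emit_link (st e : Int) (xs : List (Int × Int)) :
    pvB_emit st e (linkL none xs).reverse = (linkL none (xs ++ [(st, e)])).reverse := by
  rw [linkL_concat]
  simp [pvB_emit, patch_link]

lemma pass2_link (g : Int) : ∀ (xs : List (Int × Int)),
    (∀ p ∈ xs, p.2 ≤ g) → pvA_pass2 g xs = linkL none xs := by
  intro xs
  induction xs with
  | nil => intro _; rfl
  | cons hd t ih =>
    intro h
    obtain ⟨a, b⟩ := hd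
    cases t with
    | nil =>
      have hb : b ≤ g := h (a, b) (by simp)
      simp [pvA_pass2, linkL, nextO, not_lt.mpr hb]
    | cons hd' t' =>
      obtain ⟨c, d⟩ := hd'
      have h1 : pvA_pass2 g ((a, b) :: (c, d) :: t') = (a, b, some c) :: pvA_pass2 g ((c, d) :: t') := rfl
      have h2 : linkL none ((a, b) :: (c, d) :: t') = (a, b, some c) :: linkL none ((c, d) :: t') := rfl
      rw [h1, h2, ih (fun p hp => h p (List.mem_cons_of_mem _ hp))]

lemma loopA_stop (g : Int) (rest : List Int) (i : Int) (acc : List (Int × Int)) (s : Option Int)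
    (h : i > g) : pvA_loop g rest i acc s = acc := by
  cases rest with
  | nil => rfl
  | cons v r => simp [pvA_loop, if_pos h]

lemma loopB_stop (e : Int) (rest : List Int) (i : Int) (res : List (Int × Int × Option Int)) (s : Option Int)
    (h : i > e) : pvB_loop e rest i res s = (res, s) := by
  cases rest with
  | nil => rfl
  | cons v r => simp [pvB_loop, if_pos h]

lemma finish_none (g e : Int) (res : List (Int × Int × Option Int)) :
    pvB_finish g e (res, none) = res.reverse := rfl

lemma finish_some (g e st : Int) (res : List (Int × Int × Option Int)) :
    pvB_finish g e (res, some st) = if e = g then (pvB_emit st e res).reverse else res.reverse := rfl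

lemma pv_main (g L : Int) : ∀ (rest : List Int) (i : Int) (accA : List (Int × Int)) (s : Option Int),
    i + (rest.length : Int) = L → i ≤ g → (∀ p ∈ accA, p.2 ≤ g) →
    pvB_finish g (min g (L - 1)) (pvB_loop (min g (L - 1)) rest i (linkL none accA).reverse s)
      = pvA_pass2 g (pvA_loop g rest i accA s) := by
  intro rest
  induction rest with
  | nil =>
    intro i accA s hL hig hends
    simp only [List.length_nil] at hL
    -- i = L ≤ g, so min g (L-1) = L-1 ≠ g: no post-loop emission
    have hmin : min g (L - 1) = L - 1 := by omega
    simp only [pvB_loop, pvA_loop, hmin]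
    cases s with
    | none => rw [finish_none, List.reverse_reverse]; exact (pass2_link g accA hends).symm
    | some st =>
      rw [finish_some, if_neg (by omega : ¬ (L - 1 = g)), List.reverse_reverse]
      exact (pass2_link g accA hends).symm
  | cons v rest ih =>
    intro i accA s hL hig hends
    simp only [List.length_cons] at hL
    have hiL : i ≤ L - 1 := by push_cast at hL ⊢; omega
    have hie : ¬ i > min g (L - 1) := by omega
    have hig' : ¬ i > g := by omega
    by_cases hv : v = 0
    · simp only [pvB_loop, pvA_loop, if_neg hie, if_neg hig', if_pos hv]
      by_cases hgg : i = g
      · -- at the goal index with a zero: both sides emit the current run and stop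
        subst hgg
        have hmin : min i (L - 1) = i := by omega
        rw [if_pos rfl, loopA_stop _ _ _ _ _ (by omega), loopB_stop _ _ _ _ _ (by omega),
          finish_some, hmin, if_pos rfl, emit_link, List.reverse_reverse]
        refine (pass2_link i _ ?_).symm
        intro p hp
        rcases List.mem_append.mp hp with h' | h'
        · exact hends p h'
        · obtain rfl : p = (s.getD i, i) := by simpa using h'
          simp
      · rw [if_neg hgg]
        exact ih (i + 1) accA (some (s.getD i)) (by push_cast at hL ⊢; omega) (by omega) hends
    · cases s with
      | none =>
        simp only [pvB_loop, pvA_loop, if_neg hie, if_neg hig', if_neg hv]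
        by_cases hgg : i = g
        · subst hgg
          rw [loopA_stop _ _ _ _ _ (by omega), loopB_stop _ _ _ _ _ (by omega),
            finish_none, List.reverse_reverse]
          exact (pass2_link i accA hends).symm
        · exact ih (i + 1) accA none (by push_cast at hL ⊢; omega) (by omega) hends
      | some st =>
        simp only [pvB_loop, pvA_loop, if_neg hie, if_neg hig', if_neg hv]
        have hends' : ∀ p ∈ accA ++ [(st, i - 1)], p.2 ≤ g := by
          intro p hp
          rcases List.mem_append.mp hp with h' | h'
          · exact hends p h'
          · obtain rfl : p = (st, i - 1) := by simpa using h'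
            simp; omega
        rw [emit_link]
        by_cases hgg : i = g
        · subst hgg
          rw [loopA_stop _ _ _ _ _ (by omega), loopB_stop _ _ _ _ _ (by omega),
            finish_none, List.reverse_reverse]
          exact (pass2_link i _ hends').symm
        · exact ih (i + 1) (accA ++ [(st, i - 1)]) none (by push_cast at hL ⊢; omega) (by omega) hends'

-- ===== VERDICT (by name: the statement is the Claim_ definition above) =====
theorem find_collision_free_intervals_spec : Claim_equal_find_collision_free_intervals := by
  intro bl g _
  unfold Spec_find_collision_free_intervals find_collision_free_intervals find_collision_free_intervals_alt
  by_cases hg : g < 0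
  · rw [if_pos hg, loopA_stop _ _ _ _ _ (by omega)]
    rfl
  · rw [if_neg hg]
    exact (pv_main g (bl.length : Int) bl 0 [] none (by simp) (by omega) (by simp)).symm
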